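-- pv_equiv track=rewrite | github.com/mustafa-ersoy/Best_Algorithms_Questions | 2679.py | matrixSum
-- ===== SOURCE A (Python) =====
-- from typing import List
--
-- import heapq as heap
--
-- def matrixSum(nums: List[List[int]]) -> int:
--     rows, cols = len(nums), len(nums[0])
--
--     #heapifying each node to be able to pop minimum values constantly.
--     for r in range(rows):
--         heap.heapify(nums[r])
--     score = 0
--
--     #we'll make #cols iterations, this is number of elements to be added to the score
--     for c in range(cols):
--         #we start curr_score in each iteration with negative infinite and update later.
--         curr_score = -float('inf')
--         for r in range(rows):
--             #we pop from current row, and compare popped value with curr_score to update it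
--             popped_value = heap.heappop(nums[r])
--             curr_score = max(curr_score, popped_value)
--         #at the end of iterations, we add curr_score which is max value we got in that iteration to score.
--         score += curr_score
--     return score
-- ===== SOURCE B (Python) =====
-- from typing import List
--
--
-- def matrixSum(nums: List[List[int]]) -> int:
--     # Sort each row once, then the value popped in round c from a row is just
--     # its c-th smallest element: sum column maxima of the sorted rows.
--     cols = len(nums[0])
--     rows = [sorted(row) for row in nums]
--     score = 0
--     for c in range(cols):
--         score += max(row[c] for row in rows)
--     return score
-- ===== Notes on version B (the rewrite author's own statement) =====
-- stated objective: faster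
-- what changed: Replaces per-round heappop from every row (heapify + cols*rows pops, each O(log m)) by sorting each row once and then summing the maximum of the c-th entries of the sorted rows; B does not mutate nums (A empties each row), return value only.
import Mathlib
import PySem

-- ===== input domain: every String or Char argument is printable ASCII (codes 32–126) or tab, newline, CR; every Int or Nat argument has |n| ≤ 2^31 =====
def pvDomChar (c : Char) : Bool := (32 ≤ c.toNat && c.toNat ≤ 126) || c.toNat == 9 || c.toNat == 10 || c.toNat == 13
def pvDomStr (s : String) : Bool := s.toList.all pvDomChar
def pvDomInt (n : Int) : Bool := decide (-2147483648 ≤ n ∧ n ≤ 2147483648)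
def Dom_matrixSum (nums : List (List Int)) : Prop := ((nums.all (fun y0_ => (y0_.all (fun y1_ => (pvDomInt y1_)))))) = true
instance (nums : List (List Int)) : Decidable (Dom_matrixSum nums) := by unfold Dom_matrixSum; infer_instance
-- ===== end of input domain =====

-- ===== PORT A =====
-- B changes: one sort per row + column-max table instead of per-round heappops; faster by constants.
-- Return value only: Python A empties each row of nums in place, B does not mutate nums.
-- heappop is modelled value-exactly: it returns the minimum of the heap and the
-- remaining heap holds the remaining multiset (here: erase the first occurrence of the min).
def pvOptMax (curr : Option Int) (m : Int) : Option Int :=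
  some (match curr with | none => m | some c => max c m)

def pvPopMin (row : List Int) : Int × List Int :=
  match PySem.List.min? row (fun x => x) with
  | none => (0, row)            -- heappop [] raises IndexError; outside Pre_
  | some m => (m, row.erase m)

-- the inner 'for r in range(rows)' loop: pop one value from each row, folding curr_score
def pvInner (curr : Option Int) : List (List Int) → Option Int × List (List Int)
  | [] => (curr, [])
  | row :: rest =>
    let p := pvPopMin row
    let r := pvInner (pvOptMax curr p.1) rest
    (r.1, p.2 :: r.2)

-- the outer 'for c in range(cols)' loop (curr_score starts at -inf, modelled as none)
def pvOuter (score : Int) (st : List (List Int)) : Nat → Int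
  | 0 => score
  | n + 1 =>
    let r := pvInner none st
    pvOuter (score + r.1.getD 0) r.2 n

def matrixSum (nums : List (List Int)) : Int :=
  let cols := ((PySem.List.pyGet? nums 0).getD []).length  -- len(nums[0]); raises on [] (outside Pre_)
  pvOuter 0 nums cols

-- ===== PORT B =====
def matrixSum_alt (nums : List (List Int)) : Int :=
  let cols := ((PySem.List.pyGet? nums 0).getD []).length
  let rows := nums.map (fun row => PySem.List.sorted row (fun x => x) false)
  (PySem.List.pyRange 0 (cols : Int) 1).foldl
    (fun score c =>
      score + ((PySem.List.max? (rows.map (fun row => PySem.List.pyGetD row c 0)) (fun x => x)).getD 0))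
    0

-- ===== PRECONDITION & SPEC =====
-- Pre_ excludes exactly the inputs where A raises IndexError: the empty matrix
-- (nums[0]) and matrices with a row shorter than the first row (heappop on an
-- exhausted row).
def Pre_matrixSum (nums : List (List Int)) : Prop :=
  nums ≠ [] ∧ ∀ row ∈ nums, nums.headI.length ≤ row.length
instance (nums : List (List Int)) : Decidable (Pre_matrixSum nums) := by
  unfold Pre_matrixSum; infer_instance
def pvWitness_matrixSum : List (List Int) := [[7, 2, 1], [6, 4, 2], [6, 5, 3]]

def Spec_matrixSum (nums : List (List Int)) (out : Int) : Prop := out = matrixSum_alt nums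
instance (nums : List (List Int)) (out : Int) : Decidable (Spec_matrixSum nums out) := by
  unfold Spec_matrixSum; infer_instance

-- ===== CLAIM (what is proved, stated in full; the proofs are below) =====
def Claim_equal_matrixSum : Prop :=
  ∀ (nums : List (List Int)), Dom_matrixSum nums → Pre_matrixSum nums →
    Spec_matrixSum nums (matrixSum nums)

-- ===== LEMMAS AND PROOFS =====

-- column maxima of the (sorted) rows, consumed head-first
def pvColMax (ss : List (List Int)) : Int :=
  (PySem.List.max? (ss.map List.headI) (fun x => x)).getD 0

def pvColSum (ss : List (List Int)) : Nat → Int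
  | 0 => 0
  | n + 1 => pvColMax ss + pvColSum (ss.map List.tail) n

lemma pvPopMin_eq {row : List Int} {a : Int} {t : List Int} (hp : row.Perm (a :: t))
    (hs : (a :: t).Pairwise (fun x y : Int => x ≤ y)) :
    pvPopMin row = (a, row.erase a) := by
  have hne : row ≠ [] := by
    intro h; subst h; simpa using hp.length_eq
  rcases hmc : PySem.List.min? row (fun x => x) with _ | m
  · rw [PySem.List.min?_eq_none_iff] at hmc
    exact absurd hmc hne
  · have hmem : m ∈ row := PySem.List.min?_mem hmc
    have hisMin := PySem.List.min?_isMin hmc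
    have ha : a ∈ row := hp.mem_iff.mpr (List.mem_cons_self)
    have h1 : m ≤ a := hisMin a ha
    have h2 : a ≤ m := by
      have hm2 : m ∈ a :: t := hp.mem_iff.mp hmem
      rcases List.mem_cons.mp hm2 with h | h
      · exact le_of_eq h.symm
      · exact List.rel_of_pairwise_cons hs h
    have hma : m = a := le_antisymm h1 h2
    simp [pvPopMin, hmc, hma]

lemma pvInner_spec (st ss : List (List Int)) (curr : Option Int)
    (hf : List.Forall₂ (fun row s => row.Perm s) st ss)
    (hs : ∀ s ∈ ss, s.Pairwise (fun x y : Int => x ≤ y) ∧ s ≠ []) :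
    (pvInner curr st).1 = (ss.map List.headI).foldl pvOptMax curr ∧
      List.Forall₂ (fun row s => row.Perm s) (pvInner curr st).2 (ss.map List.tail) := by
  induction hf generalizing curr with
  | nil => simp [pvInner]
  | @cons row s st' ss' hrs _ ih =>
    obtain ⟨hpw, hne⟩ := hs s (List.mem_cons_self)
    cases s with
    | nil => exact absurd rfl hne
    | cons a t =>
      have hpop : pvPopMin row = (a, row.erase a) := pvPopMin_eq hrs hpw
      have hih := ih (pvOptMax curr a) (fun s hmem => hs s (List.mem_cons_of_mem _ hmem))
      refine ⟨?_, ?_⟩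
      · simpa [pvInner, hpop] using hih.1
      · have herase : (row.erase a).Perm t := by
          have := hrs.erase a
          simpa [List.erase_cons_head] using this
        simpa [pvInner, hpop] using List.Forall₂.cons herase hih.2

lemma pvFoldOptMax (t : List Int) : ∀ (c : Int),
    t.foldl pvOptMax (some c) = some (t.foldl max c) := by
  induction t with
  | nil => intro c; rfl
  | cons x xs ih => intro c; simpa [pvOptMax] using ih (max c x)

lemma pvOuter_spec (n : Nat) : ∀ (st ss : List (List Int)) (score : Int),
    List.Forall₂ (fun row s => row.Perm s) st ss →
    (∀ s ∈ ss, s.Pairwise (fun x y : Int => x ≤ y) ∧ n ≤ s.length) →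
    ss ≠ [] →
    pvOuter score st n = score + pvColSum ss n := by
  induction n with
  | zero => intro st ss score _ _ _; simp [pvOuter, pvColSum]
  | succ n ih =>
    intro st ss score hf hcond hne
    have hs : ∀ s ∈ ss, s.Pairwise (fun x y : Int => x ≤ y) ∧ s ≠ [] := by
      intro s hmem
      obtain ⟨h1, h2⟩ := hcond s hmem
      exact ⟨h1, by intro h; subst h; simp at h2⟩
    obtain ⟨hcurr, hstate⟩ := pvInner_spec st ss none hf hs
    cases ss with
    | nil => exact absurd rfl hne
    | cons s0 ss' =>
      have hcm : ((pvInner none st).1).getD 0 = pvColMax (s0 :: ss') := by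
        rw [hcurr]
        simp only [List.map_cons, List.foldl_cons]
        have h0 : pvOptMax none s0.headI = some s0.headI := rfl
        rw [h0, pvFoldOptMax]
        simp [pvColMax, PySem.List.max?_id_cons]
      have hrec := ih (pvInner none st).2 ((s0 :: ss').map List.tail)
        (score + ((pvInner none st).1).getD 0) hstate ?_ (by simp)
      · rw [pvOuter, hrec, hcm, pvColSum]
        ring
      · intro s' hmem
        rw [List.mem_map] at hmem
        obtain ⟨s, hsmem, rfl⟩ := hmem
        obtain ⟨h1, h2⟩ := hcond s hsmem
        refine ⟨?_, ?_⟩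
        · cases s with
          | nil => simp
          | cons a t => exact (List.pairwise_cons.mp h1).2
        · have : s.tail.length = s.length - 1 := by simp
          omega

lemma pvGetD_zero_headI (s : List Int) : s.getD 0 0 = s.headI := by
  cases s <;> rfl

lemma pvGetD_tail_succ (s : List Int) (c : Nat) : s.tail.getD c 0 = s.getD (c + 1) 0 := by
  cases s <;> rfl

lemma pvColSum_sum (n : Nat) : ∀ (ss : List (List Int)),
    pvColSum ss n =
      ∑ c ∈ Finset.range n,
        ((PySem.List.max? (ss.map (fun s => s.getD c 0)) (fun x => x)).getD 0) := by
  induction n with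
  | zero => intro ss; simp [pvColSum]
  | succ n ih =>
    intro ss
    rw [pvColSum, ih (ss.map List.tail), Finset.sum_range_succ']
    have h0 : pvColMax ss =
        (PySem.List.max? (ss.map (fun s => s.getD 0 0)) (fun x => x)).getD 0 := by
      simp only [pvColMax, pvGetD_zero_headI]
    have hshift : ∀ c : Nat,
        (ss.map List.tail).map (fun s => s.getD c 0) = ss.map (fun s => s.getD (c + 1) 0) := by
      intro c
      rw [List.map_map]
      exact List.map_congr_left (fun s _ => pvGetD_tail_succ s c)
    simp only [hshift]
    rw [h0]
    ring

lemma pvFoldlAddRange (g : Nat → Int) (n : Nat) :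
    (List.range n).foldl (fun a c => a + g c) 0 = ∑ c ∈ Finset.range n, g c := by
  induction n with
  | zero => simp
  | succ n ih => rw [List.range_succ, List.foldl_append, ih, Finset.sum_range_succ]; rfl

-- ===== VERDICT (by name: the statement is the Claim_ definition above) =====
theorem matrixSum_spec : Claim_equal_matrixSum := by
  intro nums _hdom hpre
  obtain ⟨hne, hlen⟩ := hpre
  cases nums with
  | nil => exact absurd rfl hne
  | cons r0 rest =>
    unfold Spec_matrixSum matrixSum matrixSum_alt
    have hget : ((PySem.List.pyGet? (r0 :: rest) 0).getD []) = r0 := by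
      rw [PySem.List.pyGet?_zero_cons]; rfl
    simp only [hget]
    set ss : List (List Int) := (r0 :: rest).map (fun row => PySem.List.sorted row (fun x => x) false) with hss
    -- A side
    have hf : List.Forall₂ (fun row s => row.Perm s) (r0 :: rest) ss := by
      rw [hss, List.forall₂_map_right_iff]
      exact List.forall₂_same.mpr (fun row _ => (PySem.List.sorted_perm row (fun x => x) false).symm)
    have hcond : ∀ s ∈ ss, s.Pairwise (fun x y : Int => x ≤ y) ∧ r0.length ≤ s.length := by
      intro s hmem
      rw [hss, List.mem_map] at hmem
      obtain ⟨row, hrow, rfl⟩ := hmem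
      refine ⟨PySem.List.sorted_pairwise row (fun x => x), ?_⟩
      rw [PySem.List.length_sorted]
      simpa using hlen row hrow
    have hA : pvOuter 0 (r0 :: rest) r0.length = 0 + pvColSum ss r0.length :=
      pvOuter_spec r0.length (r0 :: rest) ss 0 hf hcond (by rw [hss]; simp)
    rw [hA, zero_add, pvColSum_sum]
    -- B side
    rw [PySem.List.pyRange_one 0 (r0.length : Int)]
    have hnn : ((r0.length : Int) - 0).toNat = r0.length := by omega
    rw [hnn, List.foldl_map]
    simp only [zero_add, PySem.List.pyGetD_natCast]
    exact (pvFoldlAddRange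
      (fun c => ((PySem.List.max? (ss.map (fun s => s.getD c 0)) (fun x => x)).getD 0)) r0.length).symm
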